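-- pv_equiv track=rewrite | github.com/rivcoder/Intelligent-Systems | motion-analyzer/app.py | _longest_track_segment
-- ===== SOURCE A (Python) =====
-- def _longest_track_segment(valid_idx, max_gap=2):
--     if len(valid_idx) == 0:
--         return None
--     best_start = 0
--     best_end = 0
--     run_start = 0
--     for i in range(1, len(valid_idx)):
--         if valid_idx[i] - valid_idx[i - 1] > (max_gap + 1):
--             if (i - 1 - run_start) > (best_end - best_start):
--                 best_start, best_end = run_start, i - 1
--             run_start = i
--     if (len(valid_idx) - 1 - run_start) > (best_end - best_start):
--         best_start, best_end = run_start, len(valid_idx) - 1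
--     return int(valid_idx[best_start]), int(valid_idx[best_end])
-- ===== SOURCE B (Python) =====
-- def _longest_track_segment(valid_idx, max_gap=2):
--     if len(valid_idx) == 0:
--         return None
--     n = len(valid_idx)
--     breaks = [0] + [i for i in range(1, n)
--                     if valid_idx[i] - valid_idx[i - 1] > max_gap + 1] + [n]
--     s, e = max(zip(breaks, breaks[1:]), key=lambda p: p[1] - p[0])
--     return int(valid_idx[s]), int(valid_idx[e - 1])
-- ===== Notes on version B (the rewrite author's own statement) =====
-- stated objective: alternative
-- what changed: A tracks a running best-so-far (best_start, best_end, run_start) triple inside one stateful loop; B is a loop-free pipeline: a comprehension collects the break positions, zipping the boundary list with its own shift yields the half-open segments, and a single max-by-length call (first maximum wins, matching A's strict '>') selects the answer.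
import Mathlib
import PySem

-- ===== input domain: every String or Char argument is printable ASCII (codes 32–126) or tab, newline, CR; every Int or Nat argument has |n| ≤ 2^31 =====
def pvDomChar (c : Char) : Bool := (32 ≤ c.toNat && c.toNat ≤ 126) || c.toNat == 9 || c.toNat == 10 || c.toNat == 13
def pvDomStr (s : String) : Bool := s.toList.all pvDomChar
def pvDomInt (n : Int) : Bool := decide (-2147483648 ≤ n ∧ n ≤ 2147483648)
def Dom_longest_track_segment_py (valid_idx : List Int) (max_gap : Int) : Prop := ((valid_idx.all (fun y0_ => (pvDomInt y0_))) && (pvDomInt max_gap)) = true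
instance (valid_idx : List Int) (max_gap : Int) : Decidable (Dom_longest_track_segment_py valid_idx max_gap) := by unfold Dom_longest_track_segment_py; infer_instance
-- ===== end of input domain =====

-- B replaces A's stateful best-so-far loop with a loop-free pipeline: a comprehension of break
-- positions, zip with its own shift to form half-open segments, and a single max-by-length
-- selection (objective: alternative).

-- ===== PORT A =====
-- literal transliteration of A: for-loop over range(1, len) carrying (best_start, best_end, run_start)
def longest_track_segment_py (valid_idx : List Int) (max_gap : Int) : Option (Int × Int) :=
  if valid_idx.length = 0 then none
  else
    let st := (PySem.List.pyRange 1 (valid_idx.length : Int) 1).foldl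
      (fun (s : Int × Int × Int) i =>
        if PySem.List.pyGetD valid_idx i 0 - PySem.List.pyGetD valid_idx (i - 1) 0 > max_gap + 1 then
          (if i - 1 - s.2.2 > s.2.1 - s.1 then (s.2.2, i - 1, i) else (s.1, s.2.1, i))
        else s)
      (0, 0, 0)
    let fin := if (valid_idx.length : Int) - 1 - st.2.2 > st.2.1 - st.1
               then (st.2.2, (valid_idx.length : Int) - 1) else (st.1, st.2.1)
    some (PySem.List.pyGetD valid_idx fin.1 0, PySem.List.pyGetD valid_idx fin.2 0)

-- ===== PORT B =====
-- transliteration of Source B: breaks = [0] + [i for i in range(1,n) if gap] + [n];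
-- max(zip(breaks, breaks[1:]), key=lambda p: p[1]-p[0]); return (v[s], v[e-1])
def longest_track_segment_py_alt (valid_idx : List Int) (max_gap : Int) : Option (Int × Int) :=
  if valid_idx.length = 0 then none
  else
    let n : Int := valid_idx.length
    let breaks := [0] ++ ((PySem.List.pyRange 1 n 1).filter
        (fun i => decide (PySem.List.pyGetD valid_idx i 0 - PySem.List.pyGetD valid_idx (i - 1) 0 > max_gap + 1))) ++ [n]
    match PySem.List.max? (breaks.zip breaks.tail) (fun p => p.2 - p.1) with
    | some p => some (PySem.List.pyGetD valid_idx p.1 0, PySem.List.pyGetD valid_idx (p.2 - 1) 0)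
    | none => none   -- unreachable: the zip is nonempty (Python max would raise on [])

-- ===== PRECONDITION & SPEC =====
def Spec_longest_track_segment_py (valid_idx : List Int) (max_gap : Int) (out : Option (Int × Int)) : Prop := out = longest_track_segment_py_alt valid_idx max_gap
instance (valid_idx : List Int) (max_gap : Int) (out : Option (Int × Int)) : Decidable (Spec_longest_track_segment_py valid_idx max_gap out) := by unfold Spec_longest_track_segment_py; infer_instance

-- ===== CLAIM (what is proved, stated in full; the proofs are below) =====
def Claim_equal_longest_track_segment_py : Prop := ∀ (valid_idx : List Int) (max_gap : Int), Dom_longest_track_segment_py valid_idx max_gap → Spec_longest_track_segment_py valid_idx max_gap (longest_track_segment_py valid_idx max_gap)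

-- ===== LEMMAS AND PROOFS =====

-- the "keep-if-strictly-longer" update A performs on its current best pair
def pvUpd (b c : Int × Int) : Int × Int := if b.2 - b.1 < c.2 - c.1 then c else b

-- half-open pair → closed pair (end index decremented)
def pvDec (p : Int × Int) : Int × Int := (p.1, p.2 - 1)

-- the closed (start, end) pairs obtained from a list of segment boundaries
def pvPairs (b : List Int) : List (Int × Int) := (b.zip b.tail).map pvDec

-- PySem.List.max? with the length key is the left fold of pvUpd starting at the head
theorem pv_max?_eq_foldl (t : List (Int × Int)) (h : Int × Int) :
    PySem.List.max? (h :: t) (fun p => p.2 - p.1) = some (t.foldl pvUpd h) := by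
  induction t generalizing h with
  | nil => simp [PySem.List.max?]
  | cons x t ih =>
    have : PySem.List.max? (h :: x :: t) (fun p => p.2 - p.1)
         = PySem.List.max? (pvUpd h x :: t) (fun p => p.2 - p.1) := by
      simp only [PySem.List.max?, List.foldl, pvUpd]
      split_ifs <;> rfl
    rw [this, ih]
    rfl

-- a head of the form (0, e) with 0 ≤ e absorbs the (0,0) seed
theorem pv_foldl_seed (t : List (Int × Int)) (e : Int) (he : 0 ≤ e) :
    (((0, e) : Int × Int) :: t).foldl pvUpd (0, 0) = t.foldl pvUpd (0, e) := by
  simp only [List.foldl]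
  congr 1
  unfold pvUpd
  split_ifs with h
  · rfl
  · have : e = 0 := by omega
    subst this
    rfl

-- pvUpd commutes with the end-decrement map (the compared lengths shift by the same constant)
theorem pv_upd_dec (a b : Int × Int) : pvUpd (pvDec a) (pvDec b) = pvDec (pvUpd a b) := by
  simp only [pvUpd, pvDec]
  split_ifs <;> first | rfl | omega

theorem pv_foldl_dec (l : List (Int × Int)) (h : Int × Int) :
    (l.map pvDec).foldl pvUpd (pvDec h) = pvDec (l.foldl pvUpd h) := by
  induction l generalizing h with
  | nil => rfl
  | cons x l ih => simp only [List.map, List.foldl, pv_upd_dec]; exact ih _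

-- zipping a boundary list (with a sentinel appended) against its own shift
theorem pv_zip_append (F : List Int) (a n : Int) :
    ((a :: F) ++ [n]).zip (F ++ [n]) = (a :: F).zip F ++ [(F.getLastD a, n)] := by
  induction F generalizing a with
  | nil => rfl
  | cons f F ih =>
    simp only [List.cons_append, List.zip_cons_cons, List.getLastD_cons]
    rw [show (f :: (F ++ [n])) = (f :: F) ++ [n] from rfl, ih f]

-- loop invariant: A's fold state = (fold of pvUpd over the closed segment pairs, pending start)
theorem pv_loop (valid_idx : List Int) (max_gap : Int) :
    ∀ (l : List Int) (segs : List (Int × Int)) (rs : Int),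
      l.foldl
        (fun (s : Int × Int × Int) i =>
          if PySem.List.pyGetD valid_idx i 0 - PySem.List.pyGetD valid_idx (i - 1) 0 > max_gap + 1 then
            (if i - 1 - s.2.2 > s.2.1 - s.1 then (s.2.2, i - 1, i) else (s.1, s.2.1, i))
          else s)
        ((segs.foldl pvUpd (0, 0)).1, (segs.foldl pvUpd (0, 0)).2, rs)
      = (((l.foldl
            (fun (s : List (Int × Int) × Int) i =>
              if PySem.List.pyGetD valid_idx i 0 - PySem.List.pyGetD valid_idx (i - 1) 0 > max_gap + 1 then
                (s.1 ++ [(s.2, i - 1)], i)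
              else s)
            (segs, rs)).1.foldl pvUpd (0, 0)).1,
         ((l.foldl
            (fun (s : List (Int × Int) × Int) i =>
              if PySem.List.pyGetD valid_idx i 0 - PySem.List.pyGetD valid_idx (i - 1) 0 > max_gap + 1 then
                (s.1 ++ [(s.2, i - 1)], i)
              else s)
            (segs, rs)).1.foldl pvUpd (0, 0)).2,
         (l.foldl
            (fun (s : List (Int × Int) × Int) i =>
              if PySem.List.pyGetD valid_idx i 0 - PySem.List.pyGetD valid_idx (i - 1) 0 > max_gap + 1 then
                (s.1 ++ [(s.2, i - 1)], i)
              else s)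
            (segs, rs)).2) := by
  intro l
  induction l with
  | nil => intro segs rs; rfl
  | cons i l ih =>
    intro segs rs
    simp only [List.foldl]
    by_cases hc : PySem.List.pyGetD valid_idx i 0 - PySem.List.pyGetD valid_idx (i - 1) 0 > max_gap + 1
    · simp only [if_pos hc]
      have hupd : (if i - 1 - rs > (segs.foldl pvUpd (0, 0)).2 - (segs.foldl pvUpd (0, 0)).1
                   then (rs, i - 1, i)
                   else ((segs.foldl pvUpd (0, 0)).1, (segs.foldl pvUpd (0, 0)).2, i))
                = (((segs ++ [(rs, i - 1)]).foldl pvUpd (0, 0)).1,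
                   ((segs ++ [(rs, i - 1)]).foldl pvUpd (0, 0)).2, i) := by
        rw [List.foldl_append]
        simp only [List.foldl]
        unfold pvUpd
        split_ifs <;> rfl
      rw [hupd, ih]
    · simp only [if_neg hc]
      exact ih segs rs

-- unfolding one step of the boundary-pair construction
theorem pv_pairs_cons (a b : Int) (t : List Int) :
    pvPairs (a :: b :: t) = (a, b - 1) :: pvPairs (b :: t) := rfl

-- the accumulating segment fold expressed through the filter of break positions
theorem pv_fold_filter (valid_idx : List Int) (max_gap : Int) :
    ∀ (l : List Int) (segs : List (Int × Int)) (rs : Int),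
      l.foldl
        (fun (s : List (Int × Int) × Int) i =>
          if PySem.List.pyGetD valid_idx i 0 - PySem.List.pyGetD valid_idx (i - 1) 0 > max_gap + 1 then
            (s.1 ++ [(s.2, i - 1)], i)
          else s)
        (segs, rs)
      = (segs ++ pvPairs (rs :: l.filter
            (fun i => decide (PySem.List.pyGetD valid_idx i 0 - PySem.List.pyGetD valid_idx (i - 1) 0 > max_gap + 1))),
         (l.filter
            (fun i => decide (PySem.List.pyGetD valid_idx i 0 - PySem.List.pyGetD valid_idx (i - 1) 0 > max_gap + 1))).getLastD rs) := by
  intro l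
  induction l with
  | nil => intro segs rs; simp [pvPairs]
  | cons i l ih =>
    intro segs rs
    simp only [List.foldl, List.filter]
    by_cases hc : PySem.List.pyGetD valid_idx i 0 - PySem.List.pyGetD valid_idx (i - 1) 0 > max_gap + 1
    · simp only [if_pos hc, decide_eq_true hc]
      rw [ih (segs ++ [(rs, i - 1)]) i, pv_pairs_cons, List.getLastD_cons, List.append_assoc]
      rfl
    · simp only [if_neg hc, decide_eq_false hc]
      exact ih segs rs

-- ===== VERDICT (by name: the statement is the Claim_ definition above) =====
theorem longest_track_segment_py_spec : Claim_equal_longest_track_segment_py := by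
  unfold Claim_equal_longest_track_segment_py Spec_longest_track_segment_py
  intro v mg _
  unfold longest_track_segment_py longest_track_segment_py_alt
  by_cases hn : v.length = 0
  · simp [hn]
  · simp only [if_neg hn]
    have hn1 : (1 : Int) ≤ (v.length : Int) := by
      have : 1 ≤ v.length := Nat.one_le_iff_ne_zero.mpr hn
      exact_mod_cast this
    set L := PySem.List.pyRange 1 (v.length : Int) 1 with hL
    have hloop := pv_loop v mg L [] 0
    simp only [List.foldl] at hloop
    set st := L.foldl
      (fun (s : List (Int × Int) × Int) i =>
        if PySem.List.pyGetD v i 0 - PySem.List.pyGetD v (i - 1) 0 > mg + 1 then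
          (s.1 ++ [(s.2, i - 1)], i)
        else s) ([], 0) with hstdef
    simp only [hloop]
    set F := L.filter (fun i => decide (PySem.List.pyGetD v i 0 - PySem.List.pyGetD v (i - 1) 0 > mg + 1)) with hFdef
    have hst : st = (pvPairs (0 :: F), F.getLastD 0) := by
      rw [hstdef, pv_fold_filter v mg L [] 0, List.nil_append]
    -- the final comparison on the A side is one more pvUpd step
    have hfin : (if (v.length : Int) - 1 - F.getLastD 0 > ((pvPairs (0 :: F)).foldl pvUpd (0, 0)).2 - ((pvPairs (0 :: F)).foldl pvUpd (0, 0)).1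
                 then (F.getLastD 0, (v.length : Int) - 1)
                 else (((pvPairs (0 :: F)).foldl pvUpd (0, 0)).1, ((pvPairs (0 :: F)).foldl pvUpd (0, 0)).2))
              = (pvPairs (0 :: F) ++ [(F.getLastD 0, (v.length : Int) - 1)]).foldl pvUpd (0, 0) := by
      rw [List.foldl_append]
      simp only [List.foldl]
      unfold pvUpd
      split_ifs <;> rfl
    simp only [hst]
    rw [hfin]
    -- the B side: the zipped boundary list in cons form
    have hbz : (([(0 : Int)] ++ F ++ [(v.length : Int)]).zip (([(0 : Int)] ++ F ++ [(v.length : Int)]).tail))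
             = (0 :: F).zip F ++ [(F.getLastD 0, (v.length : Int))] := by
      simpa using pv_zip_append F 0 (v.length : Int)
    obtain ⟨e, he, t, hBl⟩ : ∃ e, 1 ≤ e ∧ ∃ t,
        (0 :: F).zip F ++ [(F.getLastD 0, (v.length : Int))] = ((0 : Int), e) :: t := by
      cases hFc : F with
      | nil => exact ⟨(v.length : Int), hn1, [], rfl⟩
      | cons f F' =>
        have hfF : f ∈ F := by rw [hFc]; exact List.mem_cons_self ..
        rw [hFdef] at hfF
        have hfL : f ∈ L := List.mem_of_mem_filter hfF
        refine ⟨f, ((PySem.List.mem_pyRange_one).1 hfL).1,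
          (f :: F').zip F' ++ [((f :: F').getLastD 0, (v.length : Int))], rfl⟩
    -- the closed segment list is the end-decremented image of the zipped boundary list
    have hCall : pvPairs (0 :: F) ++ [(F.getLastD 0, (v.length : Int) - 1)]
               = ((0 :: F).zip F ++ [(F.getLastD 0, (v.length : Int))]).map pvDec := by
      simp [pvPairs, pvDec]
    rw [hCall, hbz, hBl, pv_max?_eq_foldl]
    have hmap : (((0 : Int), e) :: t).map pvDec = ((0 : Int), e - 1) :: t.map pvDec := rfl
    rw [hmap, pv_foldl_seed _ (e - 1) (by omega)]
    have hdec : (t.map pvDec).foldl pvUpd (0, e - 1) = pvDec (t.foldl pvUpd (0, e)) :=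
      pv_foldl_dec t (0, e)
    rw [hdec]
    rfl
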